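-- pv_equiv track=rewrite | github.com/gabsito/auto_whatsapp | functions.py | order_by_sectors
-- ===== SOURCE A (Python) =====
-- def order_by_sectors(dic: dict):
--     big_dic = {"Huancavilca": {}, "Maestro": {}, "Vergeles": {}, "Geranios": {}, "Aurora": {}, "Bastion": {}, "Orquideas": {},
--                "Sin Sector": {}, "CDA": {}}
--     for contact in dic.keys():
--         if "(h)" in contact.lower() or "huancavilca" in contact.lower():
--             big_dic["Huancavilca"][contact] = dic[contact]
--         elif "(v)" in contact.lower() or "vergeles" in contact.lower():
--             big_dic["Vergeles"][contact] = dic[contact]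
--         elif "(g)" in contact.lower() or "geranios" in contact.lower():
--             big_dic["Geranios"][contact] = dic[contact]
--         elif "(m)" in contact.lower() or "maestro" in contact.lower():
--             big_dic["Maestro"][contact] = dic[contact]
--         elif "(au)" in contact.lower() or "aurora" in contact.lower():
--             big_dic["Aurora"][contact] = dic[contact]
--         elif "(bast)" in contact.lower() or "bastion" in contact.lower():
--             big_dic["Bastion"][contact] = dic[contact]
--         elif "(or)" in contact.lower() or "orquideas" in contact.lower() or "(o)" in contact.lower():
--             big_dic["Orquideas"][contact] = dic[contact]
--         elif "cda" in contact.lower() or "avt" in contact.lower():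
--             big_dic["CDA"][contact] = dic[contact]
--         else:
--             big_dic["Sin Sector"][contact] = dic[contact]
--     return big_dic
-- ===== SOURCE B (Python) =====
-- SECTOR_RULES = [
--     ("Huancavilca", ["(h)", "huancavilca"]),
--     ("Vergeles", ["(v)", "vergeles"]),
--     ("Geranios", ["(g)", "geranios"]),
--     ("Maestro", ["(m)", "maestro"]),
--     ("Aurora", ["(au)", "aurora"]),
--     ("Bastion", ["(bast)", "bastion"]),
--     ("Orquideas", ["(or)", "orquideas", "(o)"]),
--     ("CDA", ["cda", "avt"]),
-- ]
--
-- SECTOR_ORDER = ["Huancavilca", "Maestro", "Vergeles", "Geranios", "Aurora",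
--                 "Bastion", "Orquideas", "Sin Sector", "CDA"]
--
--
-- def order_by_sectors(dic: dict):
--     # staged sieve: each rule, in priority order, filters its matches out of a
--     # shrinking pool; whatever survives all eight passes is "Sin Sector"
--     remaining = list(dic.items())
--     sectors = {}
--     for name, kws in SECTOR_RULES:
--         sectors[name] = dict([it for it in remaining
--                               if any(k in it[0].lower() for k in kws)])
--         remaining = [it for it in remaining
--                      if not any(k in it[0].lower() for k in kws)]
--     sectors["Sin Sector"] = dict(remaining)
--     return {name: sectors[name] for name in SECTOR_ORDER}
-- ===== Notes on version B (the rewrite author's own statement) =====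
-- stated objective: alternative
-- what changed: Replaces A's single pass with a per-contact nine-way if/elif chain by a staged sieve: each sector rule, in priority order, filters its matches out of a shrinking pool of contacts (eight filtering passes), and whatever survives all passes becomes 'Sin Sector'; the result dict is then assembled from the per-rule buckets in A's key order.
import Mathlib
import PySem

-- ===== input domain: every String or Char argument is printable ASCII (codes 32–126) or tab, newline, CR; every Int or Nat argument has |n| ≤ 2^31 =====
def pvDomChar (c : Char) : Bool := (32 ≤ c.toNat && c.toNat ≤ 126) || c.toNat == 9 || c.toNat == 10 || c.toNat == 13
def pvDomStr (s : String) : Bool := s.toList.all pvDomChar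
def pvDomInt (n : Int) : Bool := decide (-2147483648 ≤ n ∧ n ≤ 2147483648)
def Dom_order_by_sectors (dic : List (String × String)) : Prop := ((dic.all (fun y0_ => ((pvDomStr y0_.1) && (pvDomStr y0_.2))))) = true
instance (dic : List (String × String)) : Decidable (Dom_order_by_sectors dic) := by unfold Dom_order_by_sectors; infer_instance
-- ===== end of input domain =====

-- B replaces A's single pass with a per-contact nine-way branch chain by a staged
-- sieve: each sector rule, in priority order, filters its matches out of a shrinking
-- pool, and the residue becomes "Sin Sector" (objective: alternative decomposition).

-- ===== PORT A =====
-- big_dic[sec][contact] = dic[contact]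
def pvAssignA (d : PySem.Dict String String)
    (big : PySem.Dict String (PySem.Dict String String)) (sec contact : String) :
    PySem.Dict String (PySem.Dict String String) :=
  big.insert sec ((big.getD sec PySem.Dict.empty).insert contact (d.getD contact ""))

def order_by_sectors (dic : List (String × String)) : List (String × List (String × String)) :=
  let d : PySem.Dict String String := PySem.Dict.mk dic
  let big0 : PySem.Dict String (PySem.Dict String String) :=
    PySem.Dict.ofList [("Huancavilca", PySem.Dict.empty), ("Maestro", PySem.Dict.empty),
      ("Vergeles", PySem.Dict.empty), ("Geranios", PySem.Dict.empty), ("Aurora", PySem.Dict.empty),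
      ("Bastion", PySem.Dict.empty), ("Orquideas", PySem.Dict.empty),
      ("Sin Sector", PySem.Dict.empty), ("CDA", PySem.Dict.empty)]
  let big := (dic.map Prod.fst).foldl (fun big contact =>
    if PySem.Str.isIn "(h)" (PySem.Str.lower contact) || PySem.Str.isIn "huancavilca" (PySem.Str.lower contact) then
      pvAssignA d big "Huancavilca" contact
    else if PySem.Str.isIn "(v)" (PySem.Str.lower contact) || PySem.Str.isIn "vergeles" (PySem.Str.lower contact) then
      pvAssignA d big "Vergeles" contact
    else if PySem.Str.isIn "(g)" (PySem.Str.lower contact) || PySem.Str.isIn "geranios" (PySem.Str.lower contact) then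
      pvAssignA d big "Geranios" contact
    else if PySem.Str.isIn "(m)" (PySem.Str.lower contact) || PySem.Str.isIn "maestro" (PySem.Str.lower contact) then
      pvAssignA d big "Maestro" contact
    else if PySem.Str.isIn "(au)" (PySem.Str.lower contact) || PySem.Str.isIn "aurora" (PySem.Str.lower contact) then
      pvAssignA d big "Aurora" contact
    else if PySem.Str.isIn "(bast)" (PySem.Str.lower contact) || PySem.Str.isIn "bastion" (PySem.Str.lower contact) then
      pvAssignA d big "Bastion" contact
    else if PySem.Str.isIn "(or)" (PySem.Str.lower contact) || PySem.Str.isIn "orquideas" (PySem.Str.lower contact) || PySem.Str.isIn "(o)" (PySem.Str.lower contact) then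
      pvAssignA d big "Orquideas" contact
    else if PySem.Str.isIn "cda" (PySem.Str.lower contact) || PySem.Str.isIn "avt" (PySem.Str.lower contact) then
      pvAssignA d big "CDA" contact
    else
      pvAssignA d big "Sin Sector" contact) big0
  big.items.map (fun kv => (kv.1, kv.2.items))

-- ===== PORT B =====
def pvSectorRules : List (String × List String) :=
  [("Huancavilca", ["(h)", "huancavilca"]), ("Vergeles", ["(v)", "vergeles"]),
   ("Geranios", ["(g)", "geranios"]), ("Maestro", ["(m)", "maestro"]),
   ("Aurora", ["(au)", "aurora"]), ("Bastion", ["(bast)", "bastion"]),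
   ("Orquideas", ["(or)", "orquideas", "(o)"]), ("CDA", ["cda", "avt"])]

def pvSectorOrder : List String :=
  ["Huancavilca", "Maestro", "Vergeles", "Geranios", "Aurora", "Bastion", "Orquideas",
   "Sin Sector", "CDA"]

-- any(k in it[0].lower() for k in kws)
def pvHit (kws : List String) (it : String × String) : Bool :=
  kws.any (fun k => PySem.Str.isIn k (PySem.Str.lower it.1))

def order_by_sectors_alt (dic : List (String × String)) : List (String × List (String × String)) :=
  -- state of the sieve loop: (remaining, sectors)
  let st := pvSectorRules.foldl
    (fun (st : List (String × String) × PySem.Dict String (PySem.Dict String String)) r =>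
      (st.1.filter (fun it => !(pvHit r.2 it)),
       st.2.insert r.1 (PySem.Dict.ofList (st.1.filter (fun it => pvHit r.2 it)))))
    (dic, PySem.Dict.empty)
  let sectors := st.2.insert "Sin Sector" (PySem.Dict.ofList st.1)
  -- {name: sectors[name] for name in SECTOR_ORDER}; every name is a key of sectors,
  -- so Python's sectors[name] never raises and getD is exact here
  pvSectorOrder.map (fun name => (name, (sectors.getD name PySem.Dict.empty).items))

-- ===== PRECONDITION & SPEC =====
-- Pre_ requires distinct contact names: the Python argument is a dict, which cannot hold
-- duplicate keys, so duplicate-key association lists do not represent any Python input.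
def Pre_order_by_sectors (dic : List (String × String)) : Prop := (dic.map Prod.fst).Nodup
instance (dic : List (String × String)) : Decidable (Pre_order_by_sectors dic) := by
  unfold Pre_order_by_sectors; infer_instance

def pvWitness_order_by_sectors : (List (String × String)) :=
  [("Juan (H)", "0991"), ("aurora v.", "0982"), ("nadie", "044")]

def Spec_order_by_sectors (dic : List (String × String)) (out : List (String × List (String × String))) : Prop := out = order_by_sectors_alt dic
instance (dic : List (String × String)) (out : List (String × List (String × String))) : Decidable (Spec_order_by_sectors dic out) := by unfold Spec_order_by_sectors; infer_instance

-- ===== CLAIM (what is proved, stated in full; the proofs are below) =====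
def Claim_equal_order_by_sectors : Prop := ∀ (dic : List (String × String)), Dom_order_by_sectors dic → Pre_order_by_sectors dic → Spec_order_by_sectors dic (order_by_sectors dic)

-- ===== LEMMAS AND PROOFS =====

-- A's branch chain as a function of its eight conditions
def pvChain (c1 c2 c3 c4 c5 c6 c7 c8 : Bool) : String :=
  if c1 then "Huancavilca" else if c2 then "Vergeles" else if c3 then "Geranios"
  else if c4 then "Maestro" else if c5 then "Aurora" else if c6 then "Bastion"
  else if c7 then "Orquideas" else if c8 then "CDA" else "Sin Sector"

-- the sector a contact lands in (first matching rule, else "Sin Sector")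
def pvSec (p : String × String) : String :=
  pvChain (pvHit ["(h)", "huancavilca"] p) (pvHit ["(v)", "vergeles"] p)
    (pvHit ["(g)", "geranios"] p) (pvHit ["(m)", "maestro"] p)
    (pvHit ["(au)", "aurora"] p) (pvHit ["(bast)", "bastion"] p)
    (pvHit ["(or)", "orquideas", "(o)"] p) (pvHit ["cda", "avt"] p)

theorem pvChain_mem : ∀ c1 c2 c3 c4 c5 c6 c7 c8 : Bool,
    pvChain c1 c2 c3 c4 c5 c6 c7 c8 ∈ pvSectorOrder := by decide

theorem pv_ofList_foldl (l : List (String × String)) :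
    PySem.Dict.ofList l = l.foldl (fun d p => d.insert p.1 p.2) PySem.Dict.empty := rfl

theorem pvChain_eq : ∀ c1 c2 c3 c4 c5 c6 c7 c8 : Bool,
    ((pvChain c1 c2 c3 c4 c5 c6 c7 c8 == "Huancavilca") = c1) ∧
    ((pvChain c1 c2 c3 c4 c5 c6 c7 c8 == "Vergeles") = (c2 && !c1)) ∧
    ((pvChain c1 c2 c3 c4 c5 c6 c7 c8 == "Geranios") = (c3 && (!c2 && !c1))) ∧
    ((pvChain c1 c2 c3 c4 c5 c6 c7 c8 == "Maestro") = (c4 && (!c3 && (!c2 && !c1)))) ∧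
    ((pvChain c1 c2 c3 c4 c5 c6 c7 c8 == "Aurora") = (c5 && (!c4 && (!c3 && (!c2 && !c1))))) ∧
    ((pvChain c1 c2 c3 c4 c5 c6 c7 c8 == "Bastion") = (c6 && (!c5 && (!c4 && (!c3 && (!c2 && !c1)))))) ∧
    ((pvChain c1 c2 c3 c4 c5 c6 c7 c8 == "Orquideas") = (c7 && (!c6 && (!c5 && (!c4 && (!c3 && (!c2 && !c1))))))) ∧
    ((pvChain c1 c2 c3 c4 c5 c6 c7 c8 == "CDA") = (c8 && (!c7 && (!c6 && (!c5 && (!c4 && (!c3 && (!c2 && !c1)))))))) ∧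
    ((pvChain c1 c2 c3 c4 c5 c6 c7 c8 == "Sin Sector") = (!c8 && (!c7 && (!c6 && (!c5 && (!c4 && (!c3 && (!c2 && !c1)))))))) := by
  decide

-- grouping fold: the bucket of n collects exactly the contacts with pvSec = n, in order
theorem pv_getD_groupfold (l : List (String × String))
    (big : PySem.Dict String (PySem.Dict String String)) (n : String) :
    (l.foldl (fun b p => b.insert (pvSec p) ((b.getD (pvSec p) PySem.Dict.empty).insert p.1 p.2)) big).getD n PySem.Dict.empty
      = (l.filter (fun p => pvSec p == n)).foldl (fun d p => d.insert p.1 p.2)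
          (big.getD n PySem.Dict.empty) := by
  induction l generalizing big with
  | nil => rfl
  | cons p l ih =>
    simp only [List.foldl_cons, List.filter_cons]
    by_cases h : pvSec p = n
    · simp [h, ih]
    · simp [h, ih, PySem.Dict.getD_insert, Ne.symm h]


-- A's per-contact branch chain computes pvSec and inserts the pair (under Nodup keys)
theorem pvA_step_eq (dic : List (String × String)) (hpre : (dic.map Prod.fst).Nodup)
    (big : PySem.Dict String (PySem.Dict String String)) (p : String × String) (hp : p ∈ dic) :
    (if PySem.Str.isIn "(h)" (PySem.Str.lower p.1) || PySem.Str.isIn "huancavilca" (PySem.Str.lower p.1) then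
      pvAssignA (PySem.Dict.mk dic) big "Huancavilca" p.1
    else if PySem.Str.isIn "(v)" (PySem.Str.lower p.1) || PySem.Str.isIn "vergeles" (PySem.Str.lower p.1) then
      pvAssignA (PySem.Dict.mk dic) big "Vergeles" p.1
    else if PySem.Str.isIn "(g)" (PySem.Str.lower p.1) || PySem.Str.isIn "geranios" (PySem.Str.lower p.1) then
      pvAssignA (PySem.Dict.mk dic) big "Geranios" p.1
    else if PySem.Str.isIn "(m)" (PySem.Str.lower p.1) || PySem.Str.isIn "maestro" (PySem.Str.lower p.1) then
      pvAssignA (PySem.Dict.mk dic) big "Maestro" p.1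
    else if PySem.Str.isIn "(au)" (PySem.Str.lower p.1) || PySem.Str.isIn "aurora" (PySem.Str.lower p.1) then
      pvAssignA (PySem.Dict.mk dic) big "Aurora" p.1
    else if PySem.Str.isIn "(bast)" (PySem.Str.lower p.1) || PySem.Str.isIn "bastion" (PySem.Str.lower p.1) then
      pvAssignA (PySem.Dict.mk dic) big "Bastion" p.1
    else if PySem.Str.isIn "(or)" (PySem.Str.lower p.1) || PySem.Str.isIn "orquideas" (PySem.Str.lower p.1) || PySem.Str.isIn "(o)" (PySem.Str.lower p.1) then
      pvAssignA (PySem.Dict.mk dic) big "Orquideas" p.1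
    else if PySem.Str.isIn "cda" (PySem.Str.lower p.1) || PySem.Str.isIn "avt" (PySem.Str.lower p.1) then
      pvAssignA (PySem.Dict.mk dic) big "CDA" p.1
    else
      pvAssignA (PySem.Dict.mk dic) big "Sin Sector" p.1)
    = big.insert (pvSec p) ((big.getD (pvSec p) PySem.Dict.empty).insert p.1 p.2) := by
  have hd : (PySem.Dict.mk dic).getD p.1 "" = p.2 :=
    PySem.Dict.getD_of_mem_items (d := PySem.Dict.mk dic) hp hpre ""
  simp only [pvAssignA, hd, pvSec, pvChain, pvHit, List.any, Bool.or_false, Bool.or_assoc]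
  split_ifs <;> rfl

theorem order_by_sectors_spec : Claim_equal_order_by_sectors := by
  intro dic _ hpre
  unfold Spec_order_by_sectors order_by_sectors order_by_sectors_alt
  simp only [List.foldl_map]
  have hfold := PySem.List.foldl_congr_mem (l := dic)
    (init := (PySem.Dict.ofList [("Huancavilca", (PySem.Dict.empty : PySem.Dict String String)), ("Maestro", PySem.Dict.empty),
      ("Vergeles", PySem.Dict.empty), ("Geranios", PySem.Dict.empty), ("Aurora", PySem.Dict.empty),
      ("Bastion", PySem.Dict.empty), ("Orquideas", PySem.Dict.empty),
      ("Sin Sector", PySem.Dict.empty), ("CDA", PySem.Dict.empty)]))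
    (h := fun acc x hx => pvA_step_eq dic hpre acc x hx)
  rw [hfold]
  have hnodup : (pvSectorOrder).Nodup := by decide
  have hkeys : (List.foldl (fun big p =>
      big.insert (pvSec p) ((big.getD (pvSec p) PySem.Dict.empty).insert p.1 p.2))
      (PySem.Dict.ofList [("Huancavilca", (PySem.Dict.empty : PySem.Dict String String)), ("Maestro", PySem.Dict.empty),
        ("Vergeles", PySem.Dict.empty), ("Geranios", PySem.Dict.empty), ("Aurora", PySem.Dict.empty),
        ("Bastion", PySem.Dict.empty), ("Orquideas", PySem.Dict.empty),
        ("Sin Sector", PySem.Dict.empty), ("CDA", PySem.Dict.empty)]) dic).keys = pvSectorOrder := by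
    rw [PySem.Dict.keys_foldl_insert_key]
    have hcont : ∀ y ∈ PySem.Set.ofList (dic.map pvSec), PySem.Set.contains pvSectorOrder y = true := by
      intro y hy
      rcases List.mem_map.mp ((PySem.Set.mem_ofList _ _).mp hy) with ⟨p, _, rfl⟩
      have hm := pvChain_mem (pvHit ["(h)", "huancavilca"] p) (pvHit ["(v)", "vergeles"] p)
        (pvHit ["(g)", "geranios"] p) (pvHit ["(m)", "maestro"] p)
        (pvHit ["(au)", "aurora"] p) (pvHit ["(bast)", "bastion"] p)
        (pvHit ["(or)", "orquideas", "(o)"] p) (pvHit ["cda", "avt"] p)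
      exact (PySem.Set.contains_iff _ _).mpr hm
    have hb : (PySem.Dict.ofList [("Huancavilca", (PySem.Dict.empty : PySem.Dict String String)), ("Maestro", PySem.Dict.empty),
        ("Vergeles", PySem.Dict.empty), ("Geranios", PySem.Dict.empty), ("Aurora", PySem.Dict.empty),
        ("Bastion", PySem.Dict.empty), ("Orquideas", PySem.Dict.empty),
        ("Sin Sector", PySem.Dict.empty), ("CDA", PySem.Dict.empty)]).keys = pvSectorOrder := by decide
    rw [hb, PySem.Set.update_eq_append_filter,
      List.filter_eq_nil_iff.mpr (fun y hy => by have hm := (PySem.Set.contains_iff _ _).mp (hcont y hy); simp [hm]), List.append_nil]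
  have hnd : (List.foldl (fun big p =>
      big.insert (pvSec p) ((big.getD (pvSec p) PySem.Dict.empty).insert p.1 p.2))
      (PySem.Dict.ofList [("Huancavilca", (PySem.Dict.empty : PySem.Dict String String)), ("Maestro", PySem.Dict.empty),
        ("Vergeles", PySem.Dict.empty), ("Geranios", PySem.Dict.empty), ("Aurora", PySem.Dict.empty),
        ("Bastion", PySem.Dict.empty), ("Orquideas", PySem.Dict.empty),
        ("Sin Sector", PySem.Dict.empty), ("CDA", PySem.Dict.empty)]) dic).keys.Nodup := by
    rw [hkeys]; exact hnodup
  rw [PySem.Dict.items_eq_map_keys _ hnd PySem.Dict.empty, hkeys, List.map_map]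
  simp only [pvSectorRules, List.foldl_cons, List.foldl_nil]
  apply List.map_congr_left
  intro n hn
  simp only [Function.comp_apply]
  rw [pv_getD_groupfold]
  fin_cases hn
  · simp only [PySem.Dict.getD_insert]
    norm_num
    rw [show (PySem.Dict.ofList [("Huancavilca", (PySem.Dict.empty : PySem.Dict String String)), ("Maestro", PySem.Dict.empty),
      ("Vergeles", PySem.Dict.empty), ("Geranios", PySem.Dict.empty), ("Aurora", PySem.Dict.empty),
      ("Bastion", PySem.Dict.empty), ("Orquideas", PySem.Dict.empty),
      ("Sin Sector", PySem.Dict.empty), ("CDA", PySem.Dict.empty)]).getD "Huancavilca" PySem.Dict.empty = PySem.Dict.empty from by decide,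
      ← pv_ofList_foldl]
    rw [List.filter_congr (fun a _ => by simp only [pvSec]; exact (pvChain_eq _ _ _ _ _ _ _ _).1)]
    simp
  · simp only [PySem.Dict.getD_insert]
    norm_num
    rw [show (PySem.Dict.ofList [("Huancavilca", (PySem.Dict.empty : PySem.Dict String String)), ("Maestro", PySem.Dict.empty),
      ("Vergeles", PySem.Dict.empty), ("Geranios", PySem.Dict.empty), ("Aurora", PySem.Dict.empty),
      ("Bastion", PySem.Dict.empty), ("Orquideas", PySem.Dict.empty),
      ("Sin Sector", PySem.Dict.empty), ("CDA", PySem.Dict.empty)]).getD "Maestro" PySem.Dict.empty = PySem.Dict.empty from by decide,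
      ← pv_ofList_foldl]
    rw [List.filter_congr (fun a _ => by simp only [pvSec]; exact (pvChain_eq _ _ _ _ _ _ _ _).2.2.2.1)]
    simp
  · simp only [PySem.Dict.getD_insert]
    norm_num
    rw [show (PySem.Dict.ofList [("Huancavilca", (PySem.Dict.empty : PySem.Dict String String)), ("Maestro", PySem.Dict.empty),
      ("Vergeles", PySem.Dict.empty), ("Geranios", PySem.Dict.empty), ("Aurora", PySem.Dict.empty),
      ("Bastion", PySem.Dict.empty), ("Orquideas", PySem.Dict.empty),
      ("Sin Sector", PySem.Dict.empty), ("CDA", PySem.Dict.empty)]).getD "Vergeles" PySem.Dict.empty = PySem.Dict.empty from by decide,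
      ← pv_ofList_foldl]
    rw [List.filter_congr (fun a _ => by simp only [pvSec]; exact (pvChain_eq _ _ _ _ _ _ _ _).2.1)]
    simp
  · simp only [PySem.Dict.getD_insert]
    norm_num
    rw [show (PySem.Dict.ofList [("Huancavilca", (PySem.Dict.empty : PySem.Dict String String)), ("Maestro", PySem.Dict.empty),
      ("Vergeles", PySem.Dict.empty), ("Geranios", PySem.Dict.empty), ("Aurora", PySem.Dict.empty),
      ("Bastion", PySem.Dict.empty), ("Orquideas", PySem.Dict.empty),
      ("Sin Sector", PySem.Dict.empty), ("CDA", PySem.Dict.empty)]).getD "Geranios" PySem.Dict.empty = PySem.Dict.empty from by decide,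
      ← pv_ofList_foldl]
    rw [List.filter_congr (fun a _ => by simp only [pvSec]; exact (pvChain_eq _ _ _ _ _ _ _ _).2.2.1)]
    simp
  · simp only [PySem.Dict.getD_insert]
    norm_num
    rw [show (PySem.Dict.ofList [("Huancavilca", (PySem.Dict.empty : PySem.Dict String String)), ("Maestro", PySem.Dict.empty),
      ("Vergeles", PySem.Dict.empty), ("Geranios", PySem.Dict.empty), ("Aurora", PySem.Dict.empty),
      ("Bastion", PySem.Dict.empty), ("Orquideas", PySem.Dict.empty),
      ("Sin Sector", PySem.Dict.empty), ("CDA", PySem.Dict.empty)]).getD "Aurora" PySem.Dict.empty = PySem.Dict.empty from by decide,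
      ← pv_ofList_foldl]
    rw [List.filter_congr (fun a _ => by simp only [pvSec]; exact (pvChain_eq _ _ _ _ _ _ _ _).2.2.2.2.1)]
    simp
  · simp only [PySem.Dict.getD_insert]
    norm_num
    rw [show (PySem.Dict.ofList [("Huancavilca", (PySem.Dict.empty : PySem.Dict String String)), ("Maestro", PySem.Dict.empty),
      ("Vergeles", PySem.Dict.empty), ("Geranios", PySem.Dict.empty), ("Aurora", PySem.Dict.empty),
      ("Bastion", PySem.Dict.empty), ("Orquideas", PySem.Dict.empty),
      ("Sin Sector", PySem.Dict.empty), ("CDA", PySem.Dict.empty)]).getD "Bastion" PySem.Dict.empty = PySem.Dict.empty from by decide,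
      ← pv_ofList_foldl]
    rw [List.filter_congr (fun a _ => by simp only [pvSec]; exact (pvChain_eq _ _ _ _ _ _ _ _).2.2.2.2.2.1)]
    simp
  · simp only [PySem.Dict.getD_insert]
    norm_num
    rw [show (PySem.Dict.ofList [("Huancavilca", (PySem.Dict.empty : PySem.Dict String String)), ("Maestro", PySem.Dict.empty),
      ("Vergeles", PySem.Dict.empty), ("Geranios", PySem.Dict.empty), ("Aurora", PySem.Dict.empty),
      ("Bastion", PySem.Dict.empty), ("Orquideas", PySem.Dict.empty),
      ("Sin Sector", PySem.Dict.empty), ("CDA", PySem.Dict.empty)]).getD "Orquideas" PySem.Dict.empty = PySem.Dict.empty from by decide,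
      ← pv_ofList_foldl]
    rw [List.filter_congr (fun a _ => by simp only [pvSec]; exact (pvChain_eq _ _ _ _ _ _ _ _).2.2.2.2.2.2.1)]
    simp
  · simp only [PySem.Dict.getD_insert]
    norm_num
    rw [show (PySem.Dict.ofList [("Huancavilca", (PySem.Dict.empty : PySem.Dict String String)), ("Maestro", PySem.Dict.empty),
      ("Vergeles", PySem.Dict.empty), ("Geranios", PySem.Dict.empty), ("Aurora", PySem.Dict.empty),
      ("Bastion", PySem.Dict.empty), ("Orquideas", PySem.Dict.empty),
      ("Sin Sector", PySem.Dict.empty), ("CDA", PySem.Dict.empty)]).getD "Sin Sector" PySem.Dict.empty = PySem.Dict.empty from by decide,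
      ← pv_ofList_foldl]
    rw [List.filter_congr (fun a _ => by simp only [pvSec]; exact (pvChain_eq _ _ _ _ _ _ _ _).2.2.2.2.2.2.2.2)]
  · simp only [PySem.Dict.getD_insert]
    norm_num
    rw [show (PySem.Dict.ofList [("Huancavilca", (PySem.Dict.empty : PySem.Dict String String)), ("Maestro", PySem.Dict.empty),
      ("Vergeles", PySem.Dict.empty), ("Geranios", PySem.Dict.empty), ("Aurora", PySem.Dict.empty),
      ("Bastion", PySem.Dict.empty), ("Orquideas", PySem.Dict.empty),
      ("Sin Sector", PySem.Dict.empty), ("CDA", PySem.Dict.empty)]).getD "CDA" PySem.Dict.empty = PySem.Dict.empty from by decide,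
      ← pv_ofList_foldl]
    rw [List.filter_congr (fun a _ => by simp only [pvSec]; exact (pvChain_eq _ _ _ _ _ _ _ _).2.2.2.2.2.2.2.1)]
    simp
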